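-- pv_equiv track=rewrite | github.com/Odmorenoc/cursoPython | statistics3/agrupamientoJerarquico.py | LeerClave
-- ===== SOURCE A (Python) =====
-- def LeerClave(clave):
--     a =''
--     b =''
--     i = ''
--     for c in clave:
--         if c == '[' or c == ' ':
--             pass
--         elif c == ',':
--             break
--         else:
--             a += c
--
--     for c in clave[::-1]:
--         if c == ']' or c == ' ':
--             pass
--         elif c == ',':
--             break
--         else:
--             i += c
--             b = i[::-1]
--
--     return a, b
-- ===== SOURCE B (Python) =====
-- def LeerClave(clave):
--     parts = clave.split(',')
--     a = parts[0].replace('[', '').replace(' ', '')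
--     b = parts[-1].replace(']', '').replace(' ', '')
--     return a, b
-- ===== Notes on version B (the rewrite author's own statement) =====
-- stated objective: faster
-- what changed: Replaced the two character-by-character break loops (the second of which re-reverses its accumulator after every kept character) by a single split on the comma followed by replace() cleanup of the first and last parts.
import Mathlib
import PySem

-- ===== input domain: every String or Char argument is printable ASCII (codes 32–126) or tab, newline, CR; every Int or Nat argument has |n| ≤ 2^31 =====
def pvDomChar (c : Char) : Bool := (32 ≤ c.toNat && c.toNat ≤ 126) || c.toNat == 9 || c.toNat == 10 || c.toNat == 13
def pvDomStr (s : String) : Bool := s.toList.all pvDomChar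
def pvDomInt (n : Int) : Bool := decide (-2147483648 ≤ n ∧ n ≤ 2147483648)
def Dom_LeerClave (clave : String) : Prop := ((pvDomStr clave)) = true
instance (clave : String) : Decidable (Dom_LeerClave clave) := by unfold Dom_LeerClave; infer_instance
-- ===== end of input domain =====

-- B replaces A's two char-by-char break loops (the second re-reverses its accumulator on
-- every kept character) by one split on the comma + replace() cleanup of the first and
-- last parts; measured faster in a timing run; proved equal on all inputs.

-- ===== PORT A =====
-- first for-loop of A: accumulate chars, skipping '[' and ' ', break at ','
def pvLoopA : List Char → List Char → List Char
  | [], a => a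
  | c :: cs, a =>
    if c = '[' ∨ c = ' ' then pvLoopA cs a
    else if c = ',' then a
    else pvLoopA cs (a ++ [c])

-- second for-loop of A over clave[::-1]: state (i, b), b = i[::-1] recomputed on each append
def pvLoopB : List Char → List Char × List Char → List Char × List Char
  | [], s => s
  | c :: cs, (i, b) =>
    if c = ']' ∨ c = ' ' then pvLoopB cs (i, b)
    else if c = ',' then (i, b)
    else pvLoopB cs (i ++ [c], (i ++ [c]).reverse)

def LeerClave (clave : String) : String × String :=
  let a := pvLoopA clave.toList []
  -- clave[::-1] is clave.toList.reverse (PySem.Chars.slice?_none_none_neg_one)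
  let ib := pvLoopB clave.toList.reverse ([], [])
  (String.mk a, String.mk ib.2)

-- ===== PORT B =====
def LeerClave_alt (clave : String) : String × String :=
  let parts := PySem.Chars.splitOn clave.toList [',']
  -- parts[0] / parts[-1]: split always returns a non-empty list, so headD/getLastD never default
  let a := PySem.Chars.replace (PySem.Chars.replace (parts.headD []) ['['] []) [' '] []
  let b := PySem.Chars.replace (PySem.Chars.replace (parts.getLastD []) [']'] []) [' '] []
  (String.mk a, String.mk b)

-- ===== PRECONDITION & SPEC =====
def Spec_LeerClave (clave : String) (out : String × String) : Prop := out = LeerClave_alt clave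
instance (clave : String) (out : String × String) : Decidable (Spec_LeerClave clave out) := by unfold Spec_LeerClave; infer_instance

-- ===== CLAIM (what is proved, stated in full; the proofs are below) =====
def Claim_equal_LeerClave : Prop := ∀ (clave : String), Dom_LeerClave clave → Spec_LeerClave clave (LeerClave clave)

-- ===== LEMMAS AND PROOFS =====

-- A's first loop is: filter out '[' and ' ' from the prefix before the first ','
theorem pvLoopA_eq (cs : List Char) : ∀ acc : List Char,
    pvLoopA cs acc = acc ++ (cs.takeWhile (· != ',')).filter (fun c => c != '[' && c != ' ') := by
  induction cs with
  | nil => intro acc; simp [pvLoopA]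
  | cons c cs ih =>
    intro acc
    by_cases h1 : c = '[' ∨ c = ' '
    · rcases h1 with h | h <;> subst h <;> simp [pvLoopA, ih]
    · push_neg at h1
      by_cases h2 : c = ','
      · subst h2; simp [pvLoopA]
      · simp [pvLoopA, h1, h2, ih]

-- A's second loop keeps the invariant b = i.reverse
theorem pvLoopB_eq (cs : List Char) : ∀ i : List Char,
    pvLoopB cs (i, i.reverse) =
      (i ++ (cs.takeWhile (· != ',')).filter (fun c => c != ']' && c != ' '),
       (i ++ (cs.takeWhile (· != ',')).filter (fun c => c != ']' && c != ' ')).reverse) := by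
  induction cs with
  | nil => intro i; simp [pvLoopB]
  | cons c cs ih =>
    intro i
    by_cases h1 : c = ']' ∨ c = ' '
    · rcases h1 with h | h <;> subst h <;> simp [pvLoopB, ih]
    · push_neg at h1
      by_cases h2 : c = ','
      · subst h2; simp [pvLoopB]
      · rw [show pvLoopB (c :: cs) (i, i.reverse) = pvLoopB cs (i ++ [c], (i ++ [c]).reverse) from by
          simp [pvLoopB, h1, h2], ih (i ++ [c])]
        simp [List.takeWhile_cons, h2, h1.1, h1.2]

-- replace with a single-char pattern and empty replacement is a filter
theorem pvReplaceGo_eq (x : Char) : ∀ (fuel : Nat) (cs acc : List Char), cs.length ≤ fuel →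
    PySem.Chars.replace.go [x] [] fuel cs acc = acc.reverse ++ cs.filter (· != x) := by
  intro fuel
  induction fuel with
  | zero =>
    intro cs acc h
    have : cs = [] := by cases cs <;> simp_all
    subst this; simp [PySem.Chars.replace.go]
  | succ n ih =>
    intro cs acc h
    cases cs with
    | nil => simp [PySem.Chars.replace.go]
    | cons c t =>
      simp only [PySem.Chars.replace.go]
      by_cases hx : x = c
      · subst hx
        rw [if_pos (by simp [List.isPrefixOf])]
        simp only [List.length_cons, List.length_nil, Nat.zero_add, List.drop_succ_cons,
          List.drop_zero, List.reverse_nil, List.nil_append]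
        rw [ih t acc (by simpa using Nat.le_of_succ_le_succ h)]
        simp
      · have hp : [x].isPrefixOf (c :: t) = false := by
          simp [List.isPrefixOf]; exact hx
        simp only [hp, Bool.false_eq_true, if_false]
        rw [ih t (c :: acc) (by simpa using Nat.le_of_succ_le_succ h)]
        simp [Ne.symm hx]

theorem pvReplace_eq (x : Char) (cs : List Char) :
    PySem.Chars.replace cs [x] [] = cs.filter (· != x) := by
  simp only [PySem.Chars.replace, List.isEmpty_cons, Bool.false_eq_true, if_false]
  simpa using pvReplaceGo_eq x cs.length cs [] le_rfl

-- the pieces of a split on ',' with a prefix already accumulated for the first piece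
def pvPieces : List Char → List Char → List (List Char)
  | pre, [] => [pre]
  | pre, c :: t => if c = ',' then pre :: pvPieces [] t else pvPieces (pre ++ [c]) t

theorem pvSplitGo_eq : ∀ (fuel : Nat) (l cur : List Char) (accs : List (List Char)),
    l.length ≤ fuel →
    PySem.Chars.splitOn.go [','] fuel l cur accs = accs.reverse ++ pvPieces cur.reverse l := by
  intro fuel
  induction fuel with
  | zero =>
    intro l cur accs h
    have : l = [] := by cases l <;> simp_all
    subst this; simp [PySem.Chars.splitOn.go, pvPieces]
  | succ n ih =>
    intro l cur accs h
    cases l with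
    | nil => simp [PySem.Chars.splitOn.go, pvPieces]
    | cons c t =>
      simp only [PySem.Chars.splitOn.go]
      by_cases hc : c = ','
      · subst hc
        have hp : [','].isPrefixOf (',' :: t) = true := by simp [List.isPrefixOf]
        simp only [hp, if_true, List.length_cons, List.length_nil, Nat.zero_add,
          List.drop_succ_cons, List.drop_zero]
        rw [ih _ _ _ (by simpa using Nat.le_of_succ_le_succ h)]
        simp [pvPieces]
      · have hp : [','].isPrefixOf (c :: t) = false := by
          simp [List.isPrefixOf]; exact fun h => hc h.symm
        simp only [hp, Bool.false_eq_true, if_false]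
        rw [ih t (c :: cur) accs (by simpa using Nat.le_of_succ_le_succ h)]
        simp [pvPieces, hc]

theorem pvSplitOn_eq (cs : List Char) :
    PySem.Chars.splitOn cs [','] = pvPieces [] cs := by
  simpa using pvSplitGo_eq (cs.length + 1) cs [] [] (by omega)

theorem pvPieces_headD (l : List Char) : ∀ pre : List Char,
    (pvPieces pre l).headD [] = pre ++ l.takeWhile (· != ',') := by
  induction l with
  | nil => intro pre; simp [pvPieces]
  | cons c t ih =>
    intro pre
    by_cases hc : c = ','
    · subst hc; simp [pvPieces]
    · rw [show pvPieces pre (c :: t) = pvPieces (pre ++ [c]) t from by simp [pvPieces, hc],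
        ih (pre ++ [c])]
      simp [List.takeWhile_cons, hc]

theorem pvPieces_ne_nil (l pre : List Char) : pvPieces pre l ≠ [] := by
  induction l generalizing pre with
  | nil => simp [pvPieces]
  | cons c t ih =>
    by_cases hc : c = ','
    · subst hc; simp [pvPieces]
    · simp [pvPieces, hc, ih]

-- takeWhile (!= ',') keeps everything when there is no comma
theorem pvTW_all {t : List Char} (hm : ',' ∉ t) : t.takeWhile (· != ',') = t := by
  apply List.takeWhile_eq_self_iff.mpr
  intro x hx
  simp only [bne_iff_ne, ne_eq]
  exact fun h => hm (h ▸ hx)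

-- … and is strictly shorter when there is one
theorem pvTW_len_ne {t : List Char} (hm : ',' ∈ t) :
    ¬ ((t.takeWhile (· != ',')).length = t.length) := by
  intro hlen
  have hself := (List.takeWhile_prefix (l := t) (· != ',')).eq_of_length hlen
  have := List.mem_takeWhile_imp (l := t) (p := (· != ',')) (by rw [hself]; exact hm)
  simp at this

theorem pvGetLastD_cons_ne_nil {α : Type} {l : List α} (h : l ≠ []) (a d : α) :
    (a :: l).getLastD d = l.getLastD d := by
  cases hq : l with
  | nil => exact absurd hq h
  | cons p ps => simp [List.getLastD_eq_getLast?]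

theorem pvPieces_getLastD (l : List Char) : ∀ pre : List Char,
    (pvPieces pre l).getLastD [] =
      if ',' ∈ l then (l.reverse.takeWhile (· != ',')).reverse else pre ++ l := by
  induction l with
  | nil => intro pre; simp [pvPieces]
  | cons c t ih =>
    intro pre
    by_cases hc : c = ','
    · subst hc
      rw [show pvPieces pre (',' :: t) = pre :: pvPieces [] t from by simp [pvPieces]]
      rw [pvGetLastD_cons_ne_nil (pvPieces_ne_nil t []), ih [], if_pos (List.mem_cons_self ..)]
      by_cases hm : ',' ∈ t
      · rw [if_pos hm]
        congr 1
        rw [List.reverse_cons, List.takeWhile_append,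
          if_neg (pvTW_len_ne (by simpa using hm : ',' ∈ t.reverse))]
      · rw [if_neg hm, List.reverse_cons, List.takeWhile_append,
          pvTW_all (by simpa using hm : ',' ∉ t.reverse)]
        simp
    · rw [show pvPieces pre (c :: t) = pvPieces (pre ++ [c]) t from by simp [pvPieces, hc]]
      rw [ih (pre ++ [c])]
      by_cases hm : ',' ∈ t
      · rw [if_pos hm, if_pos (List.mem_cons_of_mem _ hm)]
        congr 1
        rw [List.reverse_cons, List.takeWhile_append,
          if_neg (pvTW_len_ne (by simpa using hm : ',' ∈ t.reverse))]
      · rw [if_neg hm, if_neg (by simp [hm]; exact fun h => hc h.symm)]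
        simp

-- ===== VERDICT (by name: the statement is the Claim_ definition above) =====
theorem LeerClave_spec : Claim_equal_LeerClave := by
  intro clave _
  show _ = _
  unfold LeerClave LeerClave_alt
  have hB := pvLoopB_eq clave.toList.reverse []
  rw [List.reverse_nil] at hB
  simp only [pvLoopA_eq, hB, pvSplitOn_eq, pvPieces_headD, pvPieces_getLastD,
    List.nil_append, pvReplace_eq, List.filter_filter, Prod.mk.injEq]
  refine ⟨congrArg String.mk ?_, congrArg String.mk ?_⟩
  · -- first component: both are one filter over the prefix before the first ','
    exact List.filter_congr (fun a _ => Bool.and_comm ..)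
  · -- second component: both are one filter over the segment after the last ','
    by_cases hm : ',' ∈ clave.toList
    · rw [if_pos hm, ← List.filter_reverse]
      exact List.filter_congr (fun a _ => Bool.and_comm ..)
    · rw [if_neg hm, pvTW_all (by simpa using hm : ',' ∉ clave.toList.reverse),
        List.filter_reverse, List.reverse_reverse]
      exact List.filter_congr (fun a _ => Bool.and_comm ..)
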